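-- pv_equiv track=rewrite | github.com/alexisbellido/python-examples | demo-1.py | isGrayish
-- ===== SOURCE A (Python) =====
-- def isGrayish(components, delta=0):
--     max_delta = 0
--     rg = abs(components['r'] - components['g'])
--     gb = abs(components['g'] - components['b'])
--     br = abs(components['b'] - components['r'])
--     l = [rg, gb, br]
--     for d in l:
--         if d > max_delta:
--             max_delta = d
--     return ( max_delta <= delta )
-- ===== SOURCE B (Python) =====
-- def isGrayish(components, delta=0):
--     r, g, b = components['r'], components['g'], components['b']
--     return max(r, g, b) - min(r, g, b) <= delta
-- ===== Notes on version B (the rewrite author's own statement) =====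
-- stated objective: simpler
-- what changed: B replaces the three pairwise absolute differences and the explicit max-accumulator loop with the channel range max(r,g,b) - min(r,g,b), using that the largest pairwise difference of three numbers is max minus min.
import Mathlib
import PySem

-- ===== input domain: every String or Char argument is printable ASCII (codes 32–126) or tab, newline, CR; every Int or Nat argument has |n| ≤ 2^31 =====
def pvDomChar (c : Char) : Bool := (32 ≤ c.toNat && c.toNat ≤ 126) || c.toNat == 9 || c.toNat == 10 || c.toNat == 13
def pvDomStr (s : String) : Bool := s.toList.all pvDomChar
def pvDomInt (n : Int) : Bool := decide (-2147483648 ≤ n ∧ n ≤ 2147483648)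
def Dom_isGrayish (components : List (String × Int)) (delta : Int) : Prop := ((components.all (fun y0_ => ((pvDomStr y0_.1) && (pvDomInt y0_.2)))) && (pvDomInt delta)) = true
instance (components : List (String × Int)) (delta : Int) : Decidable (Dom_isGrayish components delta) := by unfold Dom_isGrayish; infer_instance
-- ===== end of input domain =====

-- B computes the channel spread max(r,g,b) - min(r,g,b) instead of A's three pairwise
-- absolute differences folded through a max-accumulator loop (simpler decomposition).


-- ===== PORT A =====
def isGrayish (components : List (String × Int)) (delta : Int) : Bool :=
  let d := PySem.Dict.ofList components
  match d.get? "r", d.get? "g", d.get? "b" with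
  | some r, some g, some b =>
    let rg := |r - g|
    let gb := |g - b|
    let br := |b - r|
    let l := [rg, gb, br]
    let maxDelta := l.foldl (fun m x => if x > m then x else m) 0
    decide (maxDelta ≤ delta)
  | _, _, _ => false  -- Python raises KeyError here; excluded by Pre_

-- ===== PORT B =====
def isGrayish_alt (components : List (String × Int)) (delta : Int) : Bool :=
  let d := PySem.Dict.ofList components
  match d.get? "r" with
  | none => false  -- Python raises KeyError here; excluded by Pre_
  | some r =>
    match d.get? "g" with
    | none => false
    | some g =>
      match d.get? "b" with
      | none => false
      | some b => decide (max r (max g b) - min r (min g b) ≤ delta)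

-- ===== PRECONDITION & SPEC =====
-- Pre_ excludes exactly the inputs missing one of the keys "r","g","b", where Python A raises KeyError.
def Pre_isGrayish (components : List (String × Int)) (delta : Int) : Prop :=
  "r" ∈ components.map (·.1) ∧ "g" ∈ components.map (·.1) ∧ "b" ∈ components.map (·.1)
instance (components : List (String × Int)) (delta : Int) : Decidable (Pre_isGrayish components delta) := by unfold Pre_isGrayish; infer_instance
def pvWitness_isGrayish : (List (String × Int)) × Int := ([("r", 10), ("g", 12), ("b", 11)], 3)

def Spec_isGrayish (components : List (String × Int)) (delta : Int) (out : Bool) : Prop := out = isGrayish_alt components delta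
instance (components : List (String × Int)) (delta : Int) (out : Bool) : Decidable (Spec_isGrayish components delta out) := by unfold Spec_isGrayish; infer_instance

-- ===== CLAIM (what is proved, stated in full; the proofs are below) =====
def Claim_equal_isGrayish : Prop := ∀ (components : List (String × Int)) (delta : Int), Dom_isGrayish components delta → Pre_isGrayish components delta → Spec_isGrayish components delta (isGrayish components delta)

-- ===== LEMMAS AND PROOFS =====
theorem maxAbs_eq_range (r g b : Int) :
    [|r - g|, |g - b|, |b - r|].foldl (fun m x => if x > m then x else m) 0
      = max r (max g b) - min r (min g b) := by
  simp only [List.foldl]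
  rcases abs_cases (r - g) with ⟨h1, _⟩ | ⟨h1, _⟩ <;>
  rcases abs_cases (g - b) with ⟨h2, _⟩ | ⟨h2, _⟩ <;>
  rcases abs_cases (b - r) with ⟨h3, _⟩ | ⟨h3, _⟩ <;>
  simp only [h1, h2, h3, max_def, min_def] <;> split_ifs <;> omega

-- ===== VERDICT (by name: the statement is the Claim_ definition above) =====
theorem isGrayish_spec : Claim_equal_isGrayish := by
  intro components delta _ _
  unfold Spec_isGrayish isGrayish isGrayish_alt
  cases hr : (PySem.Dict.ofList components).get? "r" <;>
  cases hg : (PySem.Dict.ofList components).get? "g" <;>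
  cases hb : (PySem.Dict.ofList components).get? "b" <;>
    simp only [hr, hg, hb, maxAbs_eq_range]
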